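-- pv_equiv track=rewrite | github.com/ezcolin2/codetree-TILs | 240907/2차원 폭발 게임/The-2D-bomb-game.py | is_bomb_remaining
-- ===== SOURCE A (Python) =====
-- def explode(arr, m):
--     n = len(arr)
--     new_arr = [row[:] for row in arr]
--     for col_idx in range(n):
--         start_idx, end_idx = 0, 0 # l, r
--         while True:
--             # 반복문 처음 시작한다는 것은 start_idx ~ end_idx까지 연속된다는 뜻
--             # 마지막이라면 종료
--             if end_idx == n-1:
--                 # 연속 횟수 체크해서 터뜨림
--                 if end_idx - start_idx + 1 >= m:
--                     for i in range(start_idx, end_idx+1):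
--                         new_arr[i][col_idx] = 0
--                 break
--             # 다른 게 나왔다면
--             if arr[start_idx][col_idx] != arr[end_idx+1][col_idx]:
--                 # 연속 횟수 체크해서 터뜨림
--                 if end_idx - start_idx + 1 >= m:
--                     for i in range(start_idx, end_idx+1):
--                         new_arr[i][col_idx] = 0
--                 start_idx = end_idx+1
--                 end_idx = end_idx+1
--                 continue
--             # 같은 게 나왔다면
--             end_idx += 1
--
--     return new_arr
--
-- def is_bomb_remaining(arr, m):
--     n = len(arr)
--     new_arr = explode(arr, m)
--     for i in range(n):
--         for j in range(n):
--             if arr[i][j]!=new_arr[i][j]: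
--                 return True
--     return False
-- ===== SOURCE B (Python) =====
-- def is_bomb_remaining(arr, m):
--     n = len(arr)
--     for col in range(n):
--         cur = arr[0][col]
--         cnt = 1
--         for i in range(1, n):
--             v = arr[i][col]
--             if v == cur:
--                 cnt += 1
--             else:
--                 if cnt >= m and cur != 0:
--                     return True
--                 cur, cnt = v, 1
--         if cnt >= m and cur != 0:
--             return True
--     return False
-- ===== Notes on version B (the rewrite author's own statement) =====
-- stated objective: simpler
-- what changed: B replaces A's copy-grid / explode-runs / compare-grids passes by a single early-exiting run scan per column that returns True as soon as a run of length >= m with nonzero value is found.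
import Mathlib
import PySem

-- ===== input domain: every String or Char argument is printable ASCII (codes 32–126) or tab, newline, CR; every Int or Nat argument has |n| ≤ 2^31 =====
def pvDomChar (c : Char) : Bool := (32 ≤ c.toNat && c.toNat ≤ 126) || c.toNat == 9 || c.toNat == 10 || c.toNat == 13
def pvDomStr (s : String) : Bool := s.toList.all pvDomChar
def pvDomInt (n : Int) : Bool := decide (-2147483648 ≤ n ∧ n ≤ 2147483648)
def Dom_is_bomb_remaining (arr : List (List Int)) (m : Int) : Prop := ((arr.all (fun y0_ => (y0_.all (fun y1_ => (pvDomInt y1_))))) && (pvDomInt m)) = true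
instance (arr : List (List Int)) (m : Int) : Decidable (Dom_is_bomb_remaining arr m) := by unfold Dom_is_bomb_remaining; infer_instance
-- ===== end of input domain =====

-- B drops A's copy-grid/explode/compare passes for a single early-exiting run scan per column (simpler).

-- ===== PORT A =====
-- arr[i][j] read (always in range on admitted inputs satisfying Pre_)
def pvGetCell (arr : List (List Int)) (i j : Nat) : Int := (arr.getD i []).getD j 0

-- new_arr[i][col] = 0
def pvZero (na : List (List Int)) (col i : Nat) : List (List Int) :=
  na.set i ((na.getD i []).set col 0)

-- for i in range(start, end_idx+1): new_arr[i][col] = 0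
def pvZeroRange (na : List (List Int)) (col start endI : Nat) : List (List Int) :=
  (List.range' start (endI + 1 - start)).foldl (fun acc i => pvZero acc col i) na

-- the `while True` loop of explode for one column; fuel = n bounds its ≤ n-1 iterations
def exLoop (arr : List (List Int)) (m : Int) (n col start endI : Nat)
    (na : List (List Int)) (fuel : Nat) : List (List Int) :=
  match fuel with
  | 0 => na
  | fuel + 1 =>
    if endI = n - 1 then
      if m ≤ (endI : Int) - (start : Int) + 1 then pvZeroRange na col start endI else na
    else if pvGetCell arr start col ≠ pvGetCell arr (endI + 1) col then
      let na' := if m ≤ (endI : Int) - (start : Int) + 1 then pvZeroRange na col start endI else na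
      exLoop arr m n col (endI + 1) (endI + 1) na' fuel
    else
      exLoop arr m n col start (endI + 1) na fuel

def explode (arr : List (List Int)) (m : Int) : List (List Int) :=
  let n := arr.length
  (List.range n).foldl (fun na col => exLoop arr m n col 0 0 na n) arr

def is_bomb_remaining (arr : List (List Int)) (m : Int) : Bool :=
  let n := arr.length
  let na := explode arr m
  (List.range n).any fun i => (List.range n).any fun j =>
    pvGetCell arr i j ≠ pvGetCell na i j

-- ===== PORT B =====
-- inner loop of Source B: cur/cnt run scan down column col, early exit on a long nonzero run
def colScan (arr : List (List Int)) (col : Nat) (m : Int) (n : Nat)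
    (cur : Int) (cnt : Int) (i : Nat) : Bool :=
  if h : i < n then
    let v := pvGetCell arr i col
    if v = cur then colScan arr col m n cur (cnt + 1) (i + 1)
    else if m ≤ cnt ∧ cur ≠ 0 then true
    else colScan arr col m n v 1 (i + 1)
  else decide (m ≤ cnt ∧ cur ≠ 0)
termination_by n - i
decreasing_by all_goals omega

def is_bomb_remaining_alt (arr : List (List Int)) (m : Int) : Bool :=
  let n := arr.length
  (List.range n).any fun col => colScan arr col m n (pvGetCell arr 0 col) 1 1

-- ===== PRECONDITION & SPEC =====
-- Pre_: every row has at least n = len(arr) entries; on a shorter row Python A raises IndexError.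
def Pre_is_bomb_remaining (arr : List (List Int)) (m : Int) : Prop :=
  ∀ row ∈ arr, arr.length ≤ row.length
instance (arr : List (List Int)) (m : Int) : Decidable (Pre_is_bomb_remaining arr m) := by
  unfold Pre_is_bomb_remaining; infer_instance

def pvWitness_is_bomb_remaining : List (List Int) × Int := ([[1, 2], [1, 4]], 2)

def Spec_is_bomb_remaining (arr : List (List Int)) (m : Int) (out : Bool) : Prop := out = is_bomb_remaining_alt arr m
instance (arr : List (List Int)) (m : Int) (out : Bool) : Decidable (Spec_is_bomb_remaining arr m out) := by unfold Spec_is_bomb_remaining; infer_instance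

-- ===== CLAIM (what is proved, stated in full; the proofs are below) =====
def Claim_equal_is_bomb_remaining : Prop := ∀ (arr : List (List Int)) (m : Int), Dom_is_bomb_remaining arr m → Pre_is_bomb_remaining arr m → Spec_is_bomb_remaining arr m (is_bomb_remaining arr m)

-- ===== LEMMAS AND PROOFS =====

-- which rows of column col the while-loop zeroes (grid-free mirror of exLoop)
def ZP (arr : List (List Int)) (m : Int) (n col start endI i : Nat) (fuel : Nat) : Bool :=
  match fuel with
  | 0 => false
  | fuel + 1 =>
    if endI = n - 1 then
      decide (m ≤ (endI : Int) - (start : Int) + 1) && decide (start ≤ i ∧ i ≤ endI)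
    else if pvGetCell arr start col ≠ pvGetCell arr (endI + 1) col then
      (decide (m ≤ (endI : Int) - (start : Int) + 1) && decide (start ≤ i ∧ i ≤ endI))
        || ZP arr m n col (endI + 1) (endI + 1) i fuel
    else
      ZP arr m n col start (endI + 1) i fuel

def Shape (n : Nat) (na : List (List Int)) : Prop :=
  na.length = n ∧ ∀ row ∈ na, n ≤ row.length

theorem shape_pvZero {n : Nat} {na : List (List Int)} (h : Shape n na) (col i : Nat) :
    Shape n (pvZero na col i) := by
  obtain ⟨h1, h2⟩ := h
  by_cases hi : i < na.length
  · refine ⟨by simp [pvZero, h1], ?_⟩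
    intro row hrow
    rcases List.mem_or_eq_of_mem_set hrow with h | h
    · exact h2 _ h
    · subst h
      rw [List.length_set]
      have hg : na.getD i [] = na[i] := by
        simp [List.getD_eq_getElem?_getD, List.getElem?_eq_getElem hi]
      rw [hg]
      exact h2 _ (List.getElem_mem hi)
  · have : pvZero na col i = na := List.set_eq_of_length_le (by omega)
    rw [this]; exact ⟨h1, h2⟩

theorem shape_pvZeroRange {n : Nat} {na : List (List Int)} (h : Shape n na)
    (col s e : Nat) : Shape n (pvZeroRange na col s e) := by
  unfold pvZeroRange
  generalize (List.range' s (e + 1 - s)) = l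
  induction l generalizing na with
  | nil => exact h
  | cons x xs ih => exact ih (shape_pvZero h col x)

theorem pvGetCell_pvZero {n : Nat} {na : List (List Int)} (h : Shape n na)
    {col i : Nat} (hi : i < n) (hcol : col < n) (i' j' : Nat) :
    pvGetCell (pvZero na col i) i' j' =
      if i' = i ∧ j' = col then 0 else pvGetCell na i' j' := by
  obtain ⟨h1, h2⟩ := h
  have hlen : i < na.length := by omega
  have hrl : col < (na[i]?.getD []).length := by
    simp only [List.getElem?_eq_getElem hlen, Option.getD_some]
    exact lt_of_lt_of_le hcol (h2 _ (List.getElem_mem hlen))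
  simp only [pvZero, pvGetCell, List.getD_eq_getElem?_getD, List.getElem?_set]
  by_cases hii : i = i'
  · subst hii
    rw [if_pos rfl, if_pos hlen, Option.getD_some, List.getElem?_set]
    by_cases hjj : col = j'
    · subst hjj
      rw [if_pos rfl, if_pos hrl, Option.getD_some, if_pos ⟨rfl, rfl⟩]
    · rw [if_neg hjj, if_neg (fun hc => hjj hc.2.symm)]
  · rw [if_neg hii, if_neg (fun hc => hii hc.1.symm)]

theorem pvGetCell_pvZeroRange {n : Nat} {col : Nat} (hcol : col < n) :
    ∀ (k s : Nat) (na : List (List Int)), Shape n na → s + k ≤ n →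
    ∀ i' j', pvGetCell ((List.range' s k).foldl (fun acc i => pvZero acc col i) na) i' j' =
      if j' = col ∧ s ≤ i' ∧ i' < s + k then 0 else pvGetCell na i' j' := by
  intro k
  induction k with
  | zero => intro s na _ _ i' j'; simp
  | succ k ih =>
    intro s na hsh hsk i' j'
    rw [List.range'_succ, List.foldl_cons]
    rw [ih (s+1) _ (shape_pvZero hsh col s) (by omega)]
    rw [pvGetCell_pvZero hsh (by omega) hcol]
    split_ifs <;> first | rfl | omega

theorem pvGetCell_zeroRange' {n : Nat} {na : List (List Int)} (h : Shape n na)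
    {col s e : Nat} (hcol : col < n) (hse : s ≤ e) (he : e < n) (i' j' : Nat) :
    pvGetCell (pvZeroRange na col s e) i' j' =
      if j' = col ∧ s ≤ i' ∧ i' ≤ e then 0 else pvGetCell na i' j' := by
  unfold pvZeroRange
  rw [pvGetCell_pvZeroRange hcol (e + 1 - s) s na h (by omega)]
  split_ifs <;> first | rfl | omega

theorem shape_exLoop {arr : List (List Int)} {m : Int} {n col : Nat} :
    ∀ (fuel s e : Nat) (na : List (List Int)), Shape n na →
      Shape n (exLoop arr m n col s e na fuel) := by
  intro fuel
  induction fuel with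
  | zero => intro s e na h; exact h
  | succ fuel ih =>
    intro s e na h
    unfold exLoop
    split_ifs with h1 h2 h3 h4
    · exact shape_pvZeroRange h col s e
    · exact h
    · exact ih _ _ _ (shape_pvZeroRange h col s e)
    · exact ih _ _ _ h
    · exact ih _ _ _ h

theorem exLoop_getCell {arr : List (List Int)} {m : Int} {n col : Nat} (hcol : col < n) :
    ∀ (fuel s e : Nat) (na : List (List Int)), Shape n na → s ≤ e → e < n →
    ∀ i j, pvGetCell (exLoop arr m n col s e na fuel) i j =
      if j = col ∧ ZP arr m n col s e i fuel = true then 0 else pvGetCell na i j := by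
  intro fuel
  induction fuel with
  | zero => intro s e na _ _ _ i j; simp [exLoop, ZP]
  | succ fuel ih =>
    intro s e na hsh hse he i j
    unfold exLoop ZP
    by_cases h1 : e = n - 1
    · rw [if_pos h1, if_pos h1]
      by_cases hm : m ≤ (e : Int) - (s : Int) + 1
      · rw [if_pos hm, pvGetCell_zeroRange' hsh hcol hse he]
        simp [hm]
      · rw [if_neg hm]
        simp [hm]
    · rw [if_neg h1, if_neg h1]
      have he1 : e + 1 < n := by omega
      by_cases hd : pvGetCell arr s col ≠ pvGetCell arr (e + 1) col
      · rw [if_pos hd, if_pos hd]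
        by_cases hm : m ≤ (e : Int) - (s : Int) + 1
        · simp only [if_pos hm]
          rw [ih (e+1) (e+1) _ (shape_pvZeroRange hsh col s e) le_rfl he1]
          rw [pvGetCell_zeroRange' hsh hcol hse he]
          by_cases hj : j = col
          · subst hj
            by_cases hz : ZP arr m n j (e+1) (e+1) i fuel = true
            · simp [hz]
            · simp [hz, hm]
          · simp [hj]
        · simp only [if_neg hm]
          rw [ih (e+1) (e+1) _ hsh le_rfl he1]
          by_cases hj : j = col
          · subst hj
            simp [hm]
          · simp [hj]
      · rw [if_neg hd, if_neg hd]
        exact ih s (e+1) na hsh (by omega) he1 i j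

-- per-column correspondence: the zeroed-and-nonzero condition matches Source B's run scan
theorem zp_colscan (arr : List (List Int)) (m : Int) (n col : Nat) :
    ∀ (fuel s e : Nat), s ≤ e → e < n → n - 1 - e < fuel →
    (∀ k, s ≤ k → k ≤ e → pvGetCell arr k col = pvGetCell arr s col) →
    ((∃ i, i < n ∧ ZP arr m n col s e i fuel = true ∧ pvGetCell arr i col ≠ 0)
      ↔ colScan arr col m n (pvGetCell arr s col) ((e : Int) - (s : Int) + 1) (e + 1) = true) := by
  intro fuel
  induction fuel with
  | zero => intro s e _ _ h; omega
  | succ fuel ih =>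
    intro s e hse he hfuel hrun
    by_cases h1 : e = n - 1
    · -- last row: loop ends, final check
      have hen : e + 1 = n := by omega
      rw [colScan]
      rw [dif_neg (by omega)]
      constructor
      · rintro ⟨i, hin, hzp, hci⟩
        unfold ZP at hzp
        rw [if_pos h1] at hzp
        simp only [Bool.and_eq_true, decide_eq_true_eq] at hzp
        obtain ⟨hm, hsi, hie⟩ := hzp
        rw [hrun i hsi hie] at hci
        simp [hm, hci]
      · intro hdec
        simp only [decide_eq_true_eq] at hdec
        refine ⟨s, by omega, ?_, hdec.2⟩
        unfold ZP
        rw [if_pos h1]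
        simp [hdec.1, hse]
    · have he1 : e + 1 < n := by omega
      rw [colScan]
      rw [dif_pos he1]
      by_cases hsame : pvGetCell arr (e + 1) col = pvGetCell arr s col
      · -- same value: run extends
        have hzp : ∀ i, ZP arr m n col s e i (fuel + 1) = ZP arr m n col s (e + 1) i fuel := by
          intro i
          conv_lhs => rw [ZP]
          rw [if_neg h1, if_neg (by simpa using hsame.symm)]
        have hcnt : (e : Int) - (s : Int) + 1 + 1 = ((e + 1 : Nat) : Int) - (s : Int) + 1 := by
          push_cast; ring
        rw [if_pos hsame]
        rw [hcnt]
        have hrun' : ∀ k, s ≤ k → k ≤ e + 1 → pvGetCell arr k col = pvGetCell arr s col := by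
          intro k hk1 hk2
          rcases Nat.lt_or_ge k (e+1) with h | h
          · exact hrun k hk1 (by omega)
          · have : k = e + 1 := by omega
            rw [this]; exact hsame
        rw [← ih s (e+1) (by omega) he1 (by omega) hrun']
        constructor
        · rintro ⟨i, a, b, c⟩; exact ⟨i, a, by rwa [← hzp], c⟩
        · rintro ⟨i, a, b, c⟩; exact ⟨i, a, by rwa [hzp], c⟩
      · -- boundary: finish the run, start a new one
        have hzp : ∀ i, ZP arr m n col s e i (fuel + 1) =
            ((decide (m ≤ (e : Int) - (s : Int) + 1) && decide (s ≤ i ∧ i ≤ e))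
              || ZP arr m n col (e + 1) (e + 1) i fuel) := by
          intro i
          conv_lhs => rw [ZP]
          rw [if_neg h1, if_pos (by simpa using fun hh => hsame hh.symm)]
        rw [if_neg hsame]
        by_cases hyes : m ≤ (e : Int) - (s : Int) + 1 ∧ pvGetCell arr s col ≠ 0
        · rw [if_pos hyes]
          constructor
          · intro _; rfl
          · intro _
            refine ⟨s, by omega, ?_, hyes.2⟩
            rw [hzp]
            simp [hyes.1, hse]
        · rw [if_neg hyes]
          have hcnt1 : ((e + 1 : Nat) : Int) - ((e + 1 : Nat) : Int) + 1 = 1 := by push_cast; ring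
          have := ih (e+1) (e+1) le_rfl he1 (by omega) (fun k hk1 hk2 => by
            have : k = e + 1 := by omega
            rw [this])
          rw [hcnt1] at this
          rw [← this]
          constructor
          · rintro ⟨i, hin, hz, hci⟩
            rw [hzp] at hz
            simp only [Bool.or_eq_true, Bool.and_eq_true, decide_eq_true_eq] at hz
            rcases hz with ⟨hm, hsi, hie⟩ | hz
            · exfalso
              rw [hrun i hsi hie] at hci
              exact hyes ⟨hm, hci⟩
            · exact ⟨i, hin, hz, hci⟩
          · rintro ⟨i, hin, hz, hci⟩
            refine ⟨i, hin, ?_, hci⟩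
            rw [hzp]
            simp [hz]

-- all columns: getCell after the column fold of explode
theorem fold_exLoop_getCell {arr : List (List Int)} {m : Int} {n : Nat} :
    ∀ (cols : List Nat), (∀ c ∈ cols, c < n) → ∀ (na : List (List Int)), Shape n na →
    ∀ i j, pvGetCell (cols.foldl (fun na col => exLoop arr m n col 0 0 na n) na) i j =
      if j ∈ cols ∧ ZP arr m n j 0 0 i n = true then 0 else pvGetCell na i j := by
  intro cols
  induction cols with
  | nil => intro _ na _ i j; simp
  | cons col cols ih =>
    intro hlt na hsh i j
    have hcol : col < n := hlt col (List.mem_cons_self ..)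
    rw [List.foldl_cons]
    rw [ih (fun c hc => hlt c (List.mem_cons_of_mem _ hc)) _ (shape_exLoop n 0 0 na hsh)]
    rw [exLoop_getCell hcol n 0 0 na hsh le_rfl (by omega)]
    by_cases hj : j = col
    · subst hj
      by_cases hz : ZP arr m n j 0 0 i n = true
      · simp [hz]
      · simp [hz]
    · simp only [List.mem_cons]
      by_cases hm : j ∈ cols
      · simp [hm, hj]
      · simp [hm, hj]

theorem is_bomb_remaining_spec : Claim_equal_is_bomb_remaining := by
  intro arr m _hdom hpre
  unfold Spec_is_bomb_remaining
  set n := arr.length with hn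
  have hsh : Shape n arr := ⟨rfl, hpre⟩
  have hA : ∀ i j, pvGetCell (explode arr m) i j =
      if j ∈ List.range n ∧ ZP arr m n j 0 0 i n = true then 0 else pvGetCell arr i j := by
    intro i j
    show pvGetCell ((List.range n).foldl (fun na col => exLoop arr m n col 0 0 na n) arr) i j = _
    exact fold_exLoop_getCell (List.range n) (fun c hc => List.mem_range.mp hc) arr hsh i j
  have hrun0 : ∀ (col : Nat) (k : Nat), 0 ≤ k → k ≤ 0 → pvGetCell arr k col = pvGetCell arr 0 col := by
    intro col k _ hk2
    have : k = 0 := by omega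
    rw [this]
  have hAiff : is_bomb_remaining arr m = true ↔
      ∃ i, i < n ∧ ∃ j, j < n ∧ pvGetCell arr i j ≠ pvGetCell (explode arr m) i j := by
    simp [is_bomb_remaining, ← hn]
  have hBiff : is_bomb_remaining_alt arr m = true ↔
      ∃ j, j < n ∧ colScan arr j m n (pvGetCell arr 0 j) 1 1 = true := by
    simp [is_bomb_remaining_alt, ← hn]
  rw [Bool.eq_iff_iff, hAiff, hBiff]
  constructor
  · rintro ⟨i, hi, j, hj, hne⟩
    rw [hA i j] at hne
    by_cases hz : j ∈ List.range n ∧ ZP arr m n j 0 0 i n = true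
    · rw [if_pos hz] at hne
      have hiff := zp_colscan arr m n j n 0 0 le_rfl (by omega) (by omega) (hrun0 j)
      norm_num at hiff
      exact ⟨j, hj, hiff.mp ⟨i, hi, hz.2, hne⟩⟩
    · rw [if_neg hz] at hne
      exact absurd rfl hne
  · rintro ⟨j, hj, hcs⟩
    have hiff := zp_colscan arr m n j n 0 0 le_rfl (by omega) (by omega) (hrun0 j)
    norm_num at hiff
    obtain ⟨i, hi, hz, hc⟩ := hiff.mpr hcs
    refine ⟨i, hi, j, hj, ?_⟩
    rw [hA i j, if_pos ⟨List.mem_range.mpr hj, hz⟩]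
    exact hc

-- ===== VERDICT (by name: the statement is the Claim_ definition above) is stated directly above =====
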